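-- pv_equiv track=rewrite | github.com/tom-fougere/Bank_account_manager | source/data_ingestion/exgest.py | join_cat_and_subcat
-- ===== SOURCE A (Python) =====
-- def join_cat_and_subcat(categories, sub_categories):
--
--     list_cat = []
--     if sub_categories is not None:
--         for sub_cat in sub_categories:
--             # Extract category and sub-category
--             cat = sub_cat[:sub_cat.find(':')]
--             sub_cat = sub_cat[sub_cat.find(':')+1:]
--
--             # Add to the list to search
--             list_cat.append((cat, sub_cat))
--
--             # Remove category from list of categories
--             if cat in categories:
--                 categories.remove(cat)
--
--     for cat in categories:
--         list_cat.append((cat, None))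
--
--     return list_cat
-- ===== SOURCE B (Python) =====
-- def join_cat_and_subcat(categories, sub_categories):
--     # Build the pairs and a removal counter in one pass over sub_categories,
--     # then one pass over categories keeping only the un-consumed ones.
--     # Note: unlike A, this does not mutate `categories` in place.
--     pairs = []
--     removals = {}
--     if sub_categories is not None:
--         for sub_cat in sub_categories:
--             i = sub_cat.find(':')
--             cat = sub_cat[:i]
--             pairs.append((cat, sub_cat[i + 1:]))
--             removals[cat] = removals.get(cat, 0) + 1
--     remaining = []
--     for cat in categories:
--         if removals.get(cat, 0) > 0:
--             removals[cat] = removals[cat] - 1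
--         else:
--             remaining.append(cat)
--     return pairs + [(cat, None) for cat in remaining]
-- ===== Notes on version B (the rewrite author's own statement) =====
-- stated objective: alternative
-- what changed: B replaces A's repeated list.remove inner scans with a removal-counter dict built in one pass over sub_categories plus a single reconstruction pass over categories, avoiding A's O(S*C) worst case (return value only: A mutates categories in place, B does not).
import Mathlib
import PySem

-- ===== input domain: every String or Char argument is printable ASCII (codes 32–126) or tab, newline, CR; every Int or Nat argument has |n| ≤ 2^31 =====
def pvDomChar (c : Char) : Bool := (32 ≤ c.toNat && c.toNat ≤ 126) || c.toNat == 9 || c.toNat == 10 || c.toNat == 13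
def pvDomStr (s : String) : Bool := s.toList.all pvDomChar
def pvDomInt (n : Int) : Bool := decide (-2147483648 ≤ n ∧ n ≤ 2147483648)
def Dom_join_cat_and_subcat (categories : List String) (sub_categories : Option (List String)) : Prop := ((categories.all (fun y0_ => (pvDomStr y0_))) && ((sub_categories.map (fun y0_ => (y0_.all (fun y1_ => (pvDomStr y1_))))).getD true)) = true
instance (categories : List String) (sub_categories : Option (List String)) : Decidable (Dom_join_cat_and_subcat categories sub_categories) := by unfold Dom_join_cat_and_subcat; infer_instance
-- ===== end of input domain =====

-- B replaces A's repeated list.remove scans with a removal-counter dict and one reconstruction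
-- pass over categories; equivalence is about the RETURN value only: A mutates `categories`
-- in place, B does not.

-- ===== PORT A =====
def join_cat_and_subcat (categories : List String) (sub_categories : Option (List String)) : List (String × Option String) :=
  let st :=
    match sub_categories with
    | none => (([] : List (String × Option String)), categories)
    | some subs =>
        subs.foldl (fun st sub_cat =>
          let cat := PySem.Str.slice sub_cat none (some (PySem.Str.find sub_cat ":"))
          let sub := PySem.Str.slice sub_cat (some (PySem.Str.find sub_cat ":" + 1)) none
          let list_cat := st.1 ++ [(cat, some sub)]
          let cats := if cat ∈ st.2 then (PySem.List.remove? st.2 cat).getD st.2 else st.2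
          (list_cat, cats)) (([] : List (String × Option String)), categories)
  st.2.foldl (fun l cat => l ++ [(cat, (none : Option String))]) st.1

-- ===== PORT B =====
def join_cat_and_subcat_alt (categories : List String) (sub_categories : Option (List String)) : List (String × Option String) :=
  let pr :=
    match sub_categories with
    | none => (([] : List (String × Option String)), (PySem.Dict.empty : PySem.Dict String Int))
    | some subs =>
        subs.foldl (fun st sub_cat =>
          let i := PySem.Str.find sub_cat ":"
          let cat := PySem.Str.slice sub_cat none (some i)
          (st.1 ++ [(cat, some (PySem.Str.slice sub_cat (some (i + 1)) none))],
           st.2.insert cat (st.2.getD cat 0 + 1)))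
          (([] : List (String × Option String)), (PySem.Dict.empty : PySem.Dict String Int))
  let rem := categories.foldl (fun (st : List String × PySem.Dict String Int) cat =>
      if st.2.getD cat 0 > 0 then (st.1, st.2.insert cat (st.2.getD cat 0 - 1))
      else (st.1 ++ [cat], st.2)) (([] : List String), pr.2)
  pr.1 ++ rem.1.map (fun cat => (cat, (none : Option String)))

-- ===== PRECONDITION & SPEC =====
def Spec_join_cat_and_subcat (categories : List String) (sub_categories : Option (List String)) (out : List (String × Option String)) : Prop := out = join_cat_and_subcat_alt categories sub_categories
instance (categories : List String) (sub_categories : Option (List String)) (out : List (String × Option String)) : Decidable (Spec_join_cat_and_subcat categories sub_categories out) := by unfold Spec_join_cat_and_subcat; infer_instance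

-- ===== CLAIM (what is proved, stated in full; the proofs are below) =====
def Claim_equal_join_cat_and_subcat : Prop := ∀ (categories : List String) (sub_categories : Option (List String)), Dom_join_cat_and_subcat categories sub_categories → Spec_join_cat_and_subcat categories sub_categories (join_cat_and_subcat categories sub_categories)

-- ===== LEMMAS AND PROOFS =====

-- the (cat, sub) pair both loops append for one sub_cat string
def pvPair (sub_cat : String) : String × Option String :=
  (PySem.Str.slice sub_cat none (some (PySem.Str.find sub_cat ":")),
   some (PySem.Str.slice sub_cat (some (PySem.Str.find sub_cat ":" + 1)) none))

def pvCat (sub_cat : String) : String :=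
  PySem.Str.slice sub_cat none (some (PySem.Str.find sub_cat ":"))

-- A's single removal step
def pvRem1 (cs : List String) (v : String) : List String :=
  if v ∈ cs then (PySem.List.remove? cs v).getD cs else cs

-- remaining categories as a function of a removal-count function
def pvKeep (cs : List String) (f : String → Int) : List String :=
  match cs with
  | [] => []
  | c :: cs => if f c > 0 then pvKeep cs (fun x => if x = c then f x - 1 else f x)
               else c :: pvKeep cs f

theorem pvKeep_zero (cs : List String) : pvKeep cs (fun _ => 0) = cs := by
  induction cs with
  | nil => rfl
  | cons c cs ih => simp [pvKeep, ih]

theorem pvRem1_cons_of_ne (c : String) (cs : List String) (v : String) (h : c ≠ v) :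
    pvRem1 (c :: cs) v = c :: pvRem1 cs v := by
  unfold pvRem1
  by_cases hv : v ∈ cs
  · simp [hv, Ne.symm h, PySem.List.remove?_cons_of_ne _ h,
      PySem.List.remove?_eq_some_erase cs v hv]
  · have hnc : v ∉ c :: cs := by simp [Ne.symm h, hv]
    simp [hv, hnc]

theorem pvKeep_rem1 (v : String) (cs : List String) (f : String → Int)
    (hf : ∀ x, 0 ≤ f x) :
    pvKeep (pvRem1 cs v) f = pvKeep cs (fun x => if x = v then f x + 1 else f x) := by
  induction cs generalizing f with
  | nil => simp [pvRem1, pvKeep]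
  | cons c cs ih =>
    by_cases hcv : c = v
    · subst hcv
      have h1 : pvRem1 (c :: cs) c = cs := by
        simp [pvRem1, PySem.List.remove?_cons_self]
      rw [h1]
      conv_rhs => rw [pvKeep]
      have hpos : (if c = c then f c + 1 else f c) > 0 := by
        simp only [if_pos]; have := hf c; omega
      rw [if_pos hpos]
      congr 1
      funext x
      by_cases hx : x = c <;> simp [hx]
    · rw [pvRem1_cons_of_ne c cs v hcv]
      conv_lhs => rw [pvKeep]
      conv_rhs => rw [pvKeep]
      have hcv2 : (if c = v then f c + 1 else f c) = f c := by simp [hcv]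
      rw [hcv2]
      by_cases hfc : f c > 0
      · rw [if_pos hfc, if_pos hfc]
        have hnn : ∀ x, 0 ≤ (fun x => if x = c then f x - 1 else f x) x := by
          intro x; by_cases hx : x = c
          · simp [hx]; omega
          · simp [hx]; exact hf x
        rw [ih _ hnn]
        congr 1
        funext x
        by_cases hx : x = v <;> by_cases hx2 : x = c <;> simp_all
      · rw [if_neg hfc, if_neg hfc, ih f hf]

-- A's removal loop equals pvKeep of the occurrence counts
theorem pvFoldRem_eq_keep (vs : List String) (cs : List String) :
    vs.foldl pvRem1 cs = pvKeep cs (fun x => (vs.count x : Int)) := by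
  induction vs generalizing cs with
  | nil => simp [pvKeep_zero]
  | cons v vs ih =>
    rw [List.foldl_cons, ih]
    rw [pvKeep_rem1 v cs (fun x => (vs.count x : Int)) (fun x => by positivity)]
    congr 1
    funext x
    by_cases hx : x = v
    · simp [hx]
    · have hvx : ¬ v = x := fun h => hx h.symm
      simp [hx, hvx]

-- splitting A's combined foldl over the pair state
theorem pvFoldA (subs : List String) (p : List (String × Option String)) (cs : List String) :
    subs.foldl (fun st sub_cat =>
          let cat := PySem.Str.slice sub_cat none (some (PySem.Str.find sub_cat ":"))
          let sub := PySem.Str.slice sub_cat (some (PySem.Str.find sub_cat ":" + 1)) none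
          let list_cat := st.1 ++ [(cat, some sub)]
          let cats := if cat ∈ st.2 then (PySem.List.remove? st.2 cat).getD st.2 else st.2
          (list_cat, cats)) (p, cs)
      = (p ++ subs.map pvPair, (subs.map pvCat).foldl pvRem1 cs) := by
  induction subs generalizing p cs with
  | nil => simp
  | cons s subs ih =>
    rw [List.foldl_cons]
    refine (ih _ _).trans ?_
    simp [pvPair, pvCat, pvRem1]

-- splitting B's combined foldl over the pair state
theorem pvFoldB (subs : List String) (p : List (String × Option String))
    (d : PySem.Dict String Int) :
    subs.foldl (fun st sub_cat =>
          let i := PySem.Str.find sub_cat ":"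
          let cat := PySem.Str.slice sub_cat none (some i)
          (st.1 ++ [(cat, some (PySem.Str.slice sub_cat (some (i + 1)) none))],
           st.2.insert cat (st.2.getD cat 0 + 1))) (p, d)
      = (p ++ subs.map pvPair,
         (subs.map pvCat).foldl (fun d c => d.insert c (d.getD c 0 + 1)) d) := by
  induction subs generalizing p d with
  | nil => simp
  | cons s subs ih =>
    rw [List.foldl_cons]
    refine (ih _ _).trans ?_
    simp [pvPair, pvCat]

-- the counter dict counts occurrences
theorem pvCounter_getD (vs : List String) (d : PySem.Dict String Int) (x : String) :
    (vs.foldl (fun d c => d.insert c (d.getD c 0 + 1)) d).getD x 0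
      = d.getD x 0 + (vs.count x : Int) := by
  induction vs generalizing d with
  | nil => simp
  | cons v vs ih =>
    rw [List.foldl_cons, ih]
    rw [PySem.Dict.getD_insert]
    by_cases hx : x = v
    · simp [hx]; ring
    · have hvx : ¬ v = x := fun h => hx h.symm
      simp [hx, hvx]

-- B's reconstruction loop yields pvKeep of the dict's counts
theorem pvFoldRemB (cats : List String) (acc : List String) (d : PySem.Dict String Int) :
    (cats.foldl (fun (st : List String × PySem.Dict String Int) cat =>
        if st.2.getD cat 0 > 0 then (st.1, st.2.insert cat (st.2.getD cat 0 - 1))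
        else (st.1 ++ [cat], st.2)) (acc, d)).1
      = acc ++ pvKeep cats (fun x => d.getD x 0) := by
  induction cats generalizing acc d with
  | nil => simp [pvKeep]
  | cons c cs ih =>
    rw [List.foldl_cons]
    by_cases h : d.getD c 0 > 0
    · simp only [h, if_pos]
      rw [ih]
      conv_rhs => rw [pvKeep]
      simp only [h, if_pos]
      congr 2
      funext x
      rw [PySem.Dict.getD_insert]
      by_cases hx : x = c <;> simp [hx]
    · simp only [h, if_neg, not_false_iff]
      rw [ih]
      conv_rhs => rw [pvKeep]
      simp only [h, if_neg, not_false_iff]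
      simp

-- A's second loop is an append of a map
theorem pvFoldAppend (cs : List String) (p : List (String × Option String)) :
    cs.foldl (fun l cat => l ++ [(cat, (none : Option String))]) p
      = p ++ cs.map (fun c => (c, (none : Option String))) := by
  induction cs generalizing p with
  | nil => simp
  | cons c cs ih => simp [ih]

-- ===== VERDICT (by name: the statement is the Claim_ definition above) =====
theorem join_cat_and_subcat_spec : Claim_equal_join_cat_and_subcat := by
  intro categories sub_categories _
  unfold Spec_join_cat_and_subcat join_cat_and_subcat join_cat_and_subcat_alt
  cases sub_categories with
  | none =>
    simp only []
    rw [pvFoldAppend, pvFoldRemB]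
    have : (fun x => (PySem.Dict.empty : PySem.Dict String Int).getD x 0) = fun _ => (0 : Int) := by
      funext x; simp
    rw [this, pvKeep_zero]
    simp
  | some subs =>
    simp only []
    rw [pvFoldA, pvFoldB, pvFoldAppend, pvFoldRemB, pvFoldRem_eq_keep]
    have hfun : (fun x => ((List.foldl (fun (d : PySem.Dict String Int) c => d.insert c (d.getD c 0 + 1)) PySem.Dict.empty (List.map pvCat subs)).getD x 0)) = (fun x => (((List.map pvCat subs).count x : Int))) := by
      funext x
      rw [pvCounter_getD]
      simp
    simp [hfun]
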